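-- pv_equiv track=rewrite | github.com/alphatwirl/alphatwirl | AlphaTwirl/Loop/splitfuncs.py | _apply_max_total
-- ===== SOURCE A (Python) =====
-- def _apply_max_total(file_nevents_list, max_total = -1):
--
--     if max_total < 0: return file_nevents_list
--
--     ret = [ ]
--     for file, nevents in file_nevents_list:
--         if max_total == 0: break
--         nevents = min(max_total, nevents)
--         ret.append((file, nevents))
--         max_total -= nevents
--     return ret
-- ===== SOURCE B (Python) =====
-- from itertools import accumulate
--
-- def _apply_max_total(file_nevents_list, max_total = -1):
--     if max_total < 0: return file_nevents_list
--     prefix = [0] + list(accumulate(n for _, n in file_nevents_list))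
--     ret = []
--     for i, (file, nevents) in enumerate(file_nevents_list):
--         if prefix[i] >= max_total: break
--         ret.append((file, min(max_total - prefix[i], nevents)))
--     return ret
-- ===== Notes on version B (the rewrite author's own statement) =====
-- stated objective: alternative
-- what changed: Replaces the mutated running remainder with a precomputed prefix-sum table of the raw nevents and a break condition prefix[i] >= max_total, clamping each kept element to max_total - prefix[i].
import Mathlib
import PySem

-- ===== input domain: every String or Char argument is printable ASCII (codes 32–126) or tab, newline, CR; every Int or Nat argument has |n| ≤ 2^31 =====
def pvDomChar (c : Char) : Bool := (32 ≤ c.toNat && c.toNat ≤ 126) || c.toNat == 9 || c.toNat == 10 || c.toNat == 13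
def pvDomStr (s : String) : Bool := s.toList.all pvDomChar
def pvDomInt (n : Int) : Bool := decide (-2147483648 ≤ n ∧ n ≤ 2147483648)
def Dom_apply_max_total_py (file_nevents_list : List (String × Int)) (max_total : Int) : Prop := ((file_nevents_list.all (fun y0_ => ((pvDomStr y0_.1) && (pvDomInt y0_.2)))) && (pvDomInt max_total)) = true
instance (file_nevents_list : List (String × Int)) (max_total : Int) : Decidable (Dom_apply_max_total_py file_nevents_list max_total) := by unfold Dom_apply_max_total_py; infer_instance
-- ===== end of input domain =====

-- B replaces the mutated running remainder with a precomputed prefix-sum table and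
-- a break condition prefix[i] >= max_total (objective: alternative decomposition, same cost).

-- ===== PORT A =====
def pvGoA : List (String × Int) → Int → List (String × Int)
  | [], _ => []
  | (f, n) :: rest, mt =>
      if mt = 0 then []
      else
        let n' := min mt n
        (f, n') :: pvGoA rest (mt - n')

def apply_max_total_py (file_nevents_list : List (String × Int)) (max_total : Int) : List (String × Int) :=
  if max_total < 0 then file_nevents_list else pvGoA file_nevents_list max_total

-- ===== PORT B =====
-- prefix = [0] + accumulate(nevents); pvScan builds the accumulate part
def pvScan : List (String × Int) → Int → List Int
  | [], _ => []
  | (_, n) :: rest, acc => (acc + n) :: pvScan rest (acc + n)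

-- the enumerate loop with break, reading prefix[i] via zipping the list with its prefix table
def pvTakeClamp : List ((String × Int) × Int) → Int → List (String × Int)
  | [], _ => []
  | ((f, n), s) :: rest, mt =>
      if s ≥ mt then [] else (f, min (mt - s) n) :: pvTakeClamp rest mt

def apply_max_total_py_alt (file_nevents_list : List (String × Int)) (max_total : Int) : List (String × Int) :=
  if max_total < 0 then file_nevents_list
  else pvTakeClamp (file_nevents_list.zip (0 :: pvScan file_nevents_list 0)) max_total

-- ===== PRECONDITION & SPEC =====
def Spec_apply_max_total_py (file_nevents_list : List (String × Int)) (max_total : Int) (out : List (String × Int)) : Prop := out = apply_max_total_py_alt file_nevents_list max_total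
instance (file_nevents_list : List (String × Int)) (max_total : Int) (out : List (String × Int)) : Decidable (Spec_apply_max_total_py file_nevents_list max_total out) := by unfold Spec_apply_max_total_py; infer_instance

-- ===== CLAIM (what is proved, stated in full; the proofs are below) =====
def Claim_equal_apply_max_total_py : Prop := ∀ (file_nevents_list : List (String × Int)) (max_total : Int), Dom_apply_max_total_py file_nevents_list max_total → Spec_apply_max_total_py file_nevents_list max_total (apply_max_total_py file_nevents_list max_total)

-- ===== LEMMAS AND PROOFS =====
theorem pvGoA_zero (l : List (String × Int)) : pvGoA l 0 = [] := by
  cases l with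
  | nil => rfl
  | cons p rest => obtain ⟨f, n⟩ := p; simp [pvGoA]

theorem pvGoA_eq_takeClamp (l : List (String × Int)) (s rem : Int) (h : 0 ≤ rem) :
    pvGoA l rem = pvTakeClamp (l.zip (s :: pvScan l s)) (s + rem) := by
  induction l generalizing s rem with
  | nil => rfl
  | cons p rest ih =>
    obtain ⟨f, n⟩ := p
    simp only [pvGoA, pvScan, List.zip_cons_cons, pvTakeClamp]
    by_cases h0 : rem = 0
    · subst h0; simp
    · have hpos : 0 < rem := lt_of_le_of_ne h (Ne.symm h0)
      rw [if_neg h0, if_neg (by omega), show s + rem - s = rem by ring]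
      congr 1
      by_cases hn : n ≤ rem
      · have hmin : min rem n = n := min_eq_right hn
        rw [hmin]
        have := ih (s + n) (rem - n) (by omega)
        rw [show s + n + (rem - n) = s + rem by ring] at this
        exact this
      · have hmin : min rem n = rem := min_eq_left (by omega)
        rw [hmin, show rem - rem = (0 : Int) by ring, pvGoA_zero]
        cases rest with
        | nil => rfl
        | cons q rest' =>
          obtain ⟨g, m⟩ := q
          simp only [pvScan, List.zip_cons_cons, pvTakeClamp]
          rw [if_pos (by omega)]

-- ===== VERDICT (by name: the statement is the Claim_ definition above) =====
theorem apply_max_total_py_spec : Claim_equal_apply_max_total_py := by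
  intro l mt _
  unfold Spec_apply_max_total_py apply_max_total_py apply_max_total_py_alt
  by_cases h : mt < 0
  · rw [if_pos h, if_pos h]
  · rw [if_neg h, if_neg h]
    have := pvGoA_eq_takeClamp l 0 mt (by omega)
    simpa using this
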